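-- pv_equiv track=rewrite | github.com/AdeptLearner123/code-names-bot-text-graph | code_names_bot_text_graph/text_disambiguator/text_sense_proposer.py | _get_proper_chunks
-- ===== SOURCE A (Python) =====
-- def _get_proper_chunks(token_tags):
--     proper_chunks = []
--     current_start = None
--     for i, (_, tag) in enumerate(token_tags):
--         if tag != "proper":
--             if current_start is not None:
--                 proper_chunks.append((current_start, i))
--                 current_start = None
--         else:
--             if current_start is None:
--                 current_start = i
--     if current_start is not None:
--         proper_chunks.append((current_start, len(token_tags)))
--     return proper_chunks
-- ===== SOURCE B (Python) =====
-- def _get_proper_chunks(token_tags):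
--     chunks = []
--     n = len(token_tags)
--     i = 0
--     while i < n:
--         if token_tags[i][1] != "proper":
--             i += 1
--         else:
--             j = i
--             while j < n and token_tags[j][1] == "proper":
--                 j += 1
--             chunks.append((i, j))
--             i = j
--     return chunks
-- ===== Notes on version B (the rewrite author's own statement) =====
-- stated objective: alternative
-- what changed: Replaces the sentinel-variable loop (current_start + post-loop flush) with a two-pointer run scanner: on meeting a proper tag it advances an inner pointer to the end of the run and emits the chunk immediately, so no pending state or flush exists.
import Mathlib
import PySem

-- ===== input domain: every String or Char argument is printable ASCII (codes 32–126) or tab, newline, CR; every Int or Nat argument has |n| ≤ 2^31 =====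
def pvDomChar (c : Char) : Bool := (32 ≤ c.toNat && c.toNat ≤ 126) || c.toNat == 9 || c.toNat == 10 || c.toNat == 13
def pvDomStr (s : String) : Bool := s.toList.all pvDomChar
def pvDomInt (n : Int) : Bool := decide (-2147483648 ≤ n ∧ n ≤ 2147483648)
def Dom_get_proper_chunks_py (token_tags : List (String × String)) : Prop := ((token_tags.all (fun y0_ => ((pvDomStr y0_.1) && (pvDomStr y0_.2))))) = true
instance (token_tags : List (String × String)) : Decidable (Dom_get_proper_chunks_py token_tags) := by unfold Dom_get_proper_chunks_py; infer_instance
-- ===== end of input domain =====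

-- B replaces A's current_start sentinel and post-loop flush with a two-pointer run scanner (alternative decomposition, same cost).

-- ===== PORT A =====
-- the for loop over enumerate(token_tags), state = (proper_chunks, current_start);
-- at the end of the list i equals len(token_tags), so the final flush uses i
def pvALoop (l : List (String × String)) (i : Nat) (acc : List (Int × Int)) (cur : Option Int) : List (Int × Int) :=
  match l with
  | [] =>
    match cur with
    | some s => acc ++ [(s, (i : Int))]
    | none => acc
  | (_, tag) :: rest =>
    if tag ≠ "proper" then
      match cur with
      | some s => pvALoop rest (i + 1) (acc ++ [(s, (i : Int))]) none
      | none => pvALoop rest (i + 1) acc none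
    else
      match cur with
      | none => pvALoop rest (i + 1) acc (some (i : Int))
      | some _ => pvALoop rest (i + 1) acc cur

def get_proper_chunks_py (token_tags : List (String × String)) : List (Int × Int) :=
  pvALoop token_tags 0 [] none

-- ===== PORT B =====
-- inner while loop of Source B: length of the run of "proper" tags at the front
def pvBRun (l : List (String × String)) : Nat :=
  match l with
  | [] => 0
  | (_, t) :: rest => if t = "proper" then pvBRun rest + 1 else 0

-- outer while loop of Source B: i is the current index
def pvBScan (l : List (String × String)) (i : Nat) : List (Int × Int) :=
  match l with
  | [] => []
  | (s, t) :: rest =>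
    if t ≠ "proper" then pvBScan rest (i + 1)
    else
      let k := pvBRun ((s, t) :: rest)
      ((i : Int), ((i + k : Nat) : Int)) :: pvBScan (rest.drop (k - 1)) (i + k)
termination_by l.length
decreasing_by
  · simp
  · have := List.length_drop (l := rest) (i := pvBRun ((s, t) :: rest) - 1)
    simp

def get_proper_chunks_py_alt (token_tags : List (String × String)) : List (Int × Int) :=
  pvBScan token_tags 0

-- ===== PRECONDITION & SPEC =====
def Spec_get_proper_chunks_py (token_tags : List (String × String)) (out : List (Int × Int)) : Prop := out = get_proper_chunks_py_alt token_tags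
instance (token_tags : List (String × String)) (out : List (Int × Int)) : Decidable (Spec_get_proper_chunks_py token_tags out) := by unfold Spec_get_proper_chunks_py; infer_instance

-- ===== CLAIM (what is proved, stated in full; the proofs are below) =====
def Claim_equal_get_proper_chunks_py : Prop := ∀ (token_tags : List (String × String)), Dom_get_proper_chunks_py token_tags → Spec_get_proper_chunks_py token_tags (get_proper_chunks_py token_tags)

-- ===== LEMMAS AND PROOFS =====
theorem pvBScan_nil (i : Nat) : pvBScan [] i = [] := by
  rw [pvBScan]

theorem pvBScan_cons (s t : String) (rest : List (String × String)) (i : Nat) :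
    pvBScan ((s, t) :: rest) i =
      if t ≠ "proper" then pvBScan rest (i + 1)
      else
        ((i : Int), ((i + pvBRun ((s, t) :: rest) : Nat) : Int)) ::
          pvBScan (rest.drop (pvBRun ((s, t) :: rest) - 1)) (i + pvBRun ((s, t) :: rest)) := by
  rw [pvBScan]

theorem pv_key (l : List (String × String)) : ∀ (i : Nat) (acc : List (Int × Int)),
    (pvALoop l i acc none = acc ++ pvBScan l i) ∧
    (∀ s : Int, pvALoop l i acc (some s) =
      acc ++ ((s, ((i + pvBRun l : Nat) : Int)) :: pvBScan (l.drop (pvBRun l)) (i + pvBRun l))) := by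
  induction l with
  | nil =>
    intro i acc
    refine ⟨by simp [pvALoop, pvBScan_nil], fun s => by simp [pvALoop, pvBScan_nil, pvBRun]⟩
  | cons hd rest ih =>
    intro i acc
    obtain ⟨s0, t⟩ := hd
    by_cases ht : t = "proper"
    · subst ht
      have hr : pvBRun (((s0 : String), ("proper" : String)) :: rest) = pvBRun rest + 1 := by
        simp [pvBRun]
      constructor
      · have h1 : pvALoop ((s0, "proper") :: rest) i acc none
            = pvALoop rest (i + 1) acc (some (i : Int)) := by
          simp [pvALoop]
        rw [h1, (ih (i + 1) acc).2 (i : Int), pvBScan_cons, hr]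
        have e : i + 1 + pvBRun rest = i + (pvBRun rest + 1) := by omega
        simp [e]
      · intro s
        have h1 : pvALoop ((s0, "proper") :: rest) i acc (some s)
            = pvALoop rest (i + 1) acc (some s) := by
          simp [pvALoop]
        rw [h1, (ih (i + 1) acc).2 s, hr]
        have e : i + 1 + pvBRun rest = i + (pvBRun rest + 1) := by omega
        simp [e, List.drop_succ_cons]
    · have hr : pvBRun ((s0, t) :: rest) = 0 := by simp [pvBRun, ht]
      have hb : pvBScan ((s0, t) :: rest) i = pvBScan rest (i + 1) := by
        rw [pvBScan_cons]; simp [ht]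
      constructor
      · have h1 : pvALoop ((s0, t) :: rest) i acc none
            = pvALoop rest (i + 1) acc none := by
          simp [pvALoop, ht]
        rw [h1, hb]
        exact (ih (i + 1) acc).1
      · intro s
        have h1 : pvALoop ((s0, t) :: rest) i acc (some s)
            = pvALoop rest (i + 1) (acc ++ [(s, (i : Int))]) none := by
          simp [pvALoop, ht]
        rw [h1, (ih (i + 1) (acc ++ [(s, (i : Int))])).1, hr]
        simp [hb]

-- ===== VERDICT (by name: the statement is the Claim_ definition above) =====
theorem get_proper_chunks_py_spec : Claim_equal_get_proper_chunks_py := by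
  intro tt _
  unfold Spec_get_proper_chunks_py get_proper_chunks_py get_proper_chunks_py_alt
  simpa using (pv_key tt 0 []).1
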